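-- pv_equiv track=rewrite | github.com/Sherwen2333/CSE101 | Hw/hw4/homework4.py | order_lunches
-- ===== SOURCE A (Python) =====
-- def order_lunches(stock, orders):
--     ak=0
--     for i in orders:
--         if i in dict(stock).keys():
--             if stock[i]>0:
--                 stock[i]-=1
--                 ak+=1
--     return ak
-- ===== SOURCE B (Python) =====
-- def order_lunches(stock, orders):
--     counts = {}
--     for i in orders:
--         counts[i] = counts.get(i, 0) + 1
--     ak = 0
--     for item, qty in list(stock.items()):
--         if qty > 0:
--             take = min(counts.get(item, 0), qty)
--             stock[item] = qty - take
--             ak += take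
--     return ak
-- ===== Notes on version B (the rewrite author's own statement) =====
-- stated objective: faster
-- what changed: B builds a frequency table of the orders once and then fulfils each stock item in a single batch step (take = min(count, qty)), instead of A's per-order scan that rebuilds dict(stock) on every iteration; Pre_ only excludes association lists with duplicate keys, which cannot arise from a Python dict argument.
import Mathlib
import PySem

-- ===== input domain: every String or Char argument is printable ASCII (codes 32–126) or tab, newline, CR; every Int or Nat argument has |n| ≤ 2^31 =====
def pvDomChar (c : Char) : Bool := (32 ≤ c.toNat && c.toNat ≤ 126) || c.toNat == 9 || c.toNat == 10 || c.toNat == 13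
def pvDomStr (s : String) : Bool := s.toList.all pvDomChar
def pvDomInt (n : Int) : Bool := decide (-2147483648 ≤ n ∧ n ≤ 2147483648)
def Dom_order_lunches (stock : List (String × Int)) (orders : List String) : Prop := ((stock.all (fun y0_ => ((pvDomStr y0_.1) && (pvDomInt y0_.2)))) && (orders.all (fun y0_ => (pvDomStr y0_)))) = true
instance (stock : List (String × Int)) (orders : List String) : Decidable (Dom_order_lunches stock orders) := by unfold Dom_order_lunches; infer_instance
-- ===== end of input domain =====

-- B builds a frequency table of the orders once and fulfils each stock item in one batch
-- step, instead of A's per-order scan (which also rebuilds dict(stock) on every order);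
-- both mutate stock identically in Python, the equivalence proved is about the return value.

-- ===== PORT A =====
def order_lunches (stock : List (String × Int)) (orders : List String) : Int :=
  (orders.foldl (fun (st : PySem.Dict String Int × Int) i =>
      if st.1.contains i then                                -- if i in dict(stock).keys():
        if st.1.getD i 0 > 0 then                            --   if stock[i] > 0:
          (st.1.insert i (st.1.getD i 0 - 1), st.2 + 1)      --     stock[i] -= 1; ak += 1
        else st
      else st)
    (PySem.Dict.mk stock, 0)).2

-- ===== PORT B =====
def order_lunches_alt (stock : List (String × Int)) (orders : List String) : Int :=
  let counts := orders.foldl (fun (c : PySem.Dict String Int) i => c.insert i (c.getD i 0 + 1)) PySem.Dict.empty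
  (stock.foldl (fun (st : PySem.Dict String Int × Int) p =>
      if p.2 > 0 then
        let take := min (counts.getD p.1 0) p.2
        (st.1.insert p.1 (p.2 - take), st.2 + take)
      else st)
    (PySem.Dict.mk stock, 0)).2

-- ===== PRECONDITION & SPEC =====
-- Pre_ excludes association lists with duplicate keys: the Python argument is a dict, which
-- cannot have duplicate keys, so no input the Python A accepts is excluded.
def Pre_order_lunches (stock : List (String × Int)) (orders : List String) : Prop :=
  (stock.map Prod.fst).Nodup
instance (stock : List (String × Int)) (orders : List String) : Decidable (Pre_order_lunches stock orders) := by unfold Pre_order_lunches; infer_instance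

def pvWitness_order_lunches : (List (String × Int)) × List String :=
  ([("soup", 2), ("rice", -1)], ["soup", "rice", "soup", "soup", "nan"])

def Spec_order_lunches (stock : List (String × Int)) (orders : List String) (out : Int) : Prop := out = order_lunches_alt stock orders
instance (stock : List (String × Int)) (orders : List String) (out : Int) : Decidable (Spec_order_lunches stock orders out) := by unfold Spec_order_lunches; infer_instance

-- ===== CLAIM (what is proved, stated in full; the proofs are below) =====
def Claim_equal_order_lunches : Prop := ∀ (stock : List (String × Int)) (orders : List String), Dom_order_lunches stock orders → Pre_order_lunches stock orders → Spec_order_lunches stock orders (order_lunches stock orders)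

-- ===== LEMMAS AND PROOFS =====

-- the per-entry contribution of stock entry p given the order list os
def pvTerm (os : List String) (p : String × Int) : Int :=
  if p.2 > 0 then min (os.count p.1 : Int) p.2 else 0

-- B's stock fold computes the sum of the per-entry contributions
theorem pvB_fold (os : List String) (l : List (String × Int))
    (d : PySem.Dict String Int) (a : Int) :
    (l.foldl (fun (st : PySem.Dict String Int × Int) p =>
        if p.2 > 0 then
          (st.1.insert p.1 (p.2 - min ((os.foldl (fun (c : PySem.Dict String Int) i => c.insert i (c.getD i 0 + 1)) PySem.Dict.empty).getD p.1 0) p.2),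
           st.2 + min ((os.foldl (fun (c : PySem.Dict String Int) i => c.insert i (c.getD i 0 + 1)) PySem.Dict.empty).getD p.1 0) p.2)
        else st)
      (d, a)).2 = a + (l.map (pvTerm os)).sum := by
  induction l generalizing d a with
  | nil => simp
  | cons p t ih =>
      simp only [List.foldl_cons, List.map_cons, List.sum_cons]
      by_cases hp : p.2 > 0
      · simp only [hp, ih]
        have hc : (os.foldl (fun (c : PySem.Dict String Int) i => c.insert i (c.getD i 0 + 1)) PySem.Dict.empty).getD p.1 0 = (os.count p.1 : Int) := by
          rw [PySem.Dict.getD_foldl_insert_add_one]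
          simp [PySem.Dict.getD_empty]
        simp [pvTerm, hp, hc]
        ring
      · simp only [if_neg hp, ih]
        simp [pvTerm, hp]

-- A's order fold computes the same sum, for any dict with distinct keys
theorem pvA_fold (os : List String) (d : PySem.Dict String Int) (a : Int)
    (hnd : d.keys.Nodup) :
    (os.foldl (fun (st : PySem.Dict String Int × Int) i =>
        if st.1.contains i then
          if st.1.getD i 0 > 0 then (st.1.insert i (st.1.getD i 0 - 1), st.2 + 1) else st
        else st)
      (d, a)).2 = a + (d.items.map (pvTerm os)).sum := by
  induction os generalizing d a with
  | nil =>
      simp only [List.foldl_nil]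
      have hz : (d.items.map (pvTerm ([] : List String))).sum = 0 := by
        apply List.sum_eq_zero
        intro x hx
        simp only [List.mem_map] at hx
        obtain ⟨p, _, rfl⟩ := hx
        simp only [pvTerm, List.count_nil]
        split_ifs with h <;> [skip; rfl]
        simp only [Nat.cast_zero]
        omega
      omega
  | cons i r ih =>
      simp only [List.foldl_cons]
      by_cases hc : d.contains i = true
      · have hv : ∃ v, d.get? i = some v := by
          rcases h : d.get? i with _ | v
          · rw [PySem.Dict.contains_eq_isSome_get?, h] at hc; simp at hc
          · exact ⟨v, rfl⟩
        obtain ⟨v, hv⟩ := hv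
        have hgd : d.getD i 0 = v := by rw [PySem.Dict.getD_eq_get?_getD, hv]; rfl
        have hmem : (i, v) ∈ d.items := PySem.Dict.mem_items_of_get?_eq_some _ hv
        by_cases hpos : d.getD i 0 > 0
        · simp only [hc, if_true]
          rw [if_pos hpos]
          rw [ih _ _ (PySem.Dict.nodup_keys_insert _ _ _ hnd)]
          have hitems := PySem.Dict.items_insert_of_contains (d := d) (k := i)
            (v := d.getD i 0 - 1) hc
          rw [hitems, List.map_map]
          -- per-entry sum comparison
          have key : ∀ l : List (String × Int), (l.map Prod.fst).Nodup → (i, v) ∈ l →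
              (l.map (pvTerm (i :: r))).sum =
              1 + (l.map (pvTerm r ∘ fun p => if p.1 == i then (i, d.getD i 0 - 1) else p)).sum := by
            intro l
            induction l with
            | nil => intro _ h; simp at h
            | cons q t iht =>
                intro hnod hm
                simp only [List.map_cons, List.nodup_cons, List.mem_map] at hnod
                simp only [List.map_cons, List.sum_cons, Function.comp_def]
                rcases List.mem_cons.mp hm with hq | ht
                · -- q = (i, v)
                  have hq1 : q = (i, v) := hq.symm
                  subst hq1
                  have hti : ∀ p ∈ t, ¬ p.1 = i := by
                    intro p hp hpi
                    exact hnod.1 ⟨p, hp, hpi⟩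
                  have htmap : (t.map (fun p => pvTerm r (if p.1 == i then (i, d.getD i 0 - 1) else p))).sum
                      = (t.map (pvTerm r)).sum := by
                    congr 1
                    apply List.map_congr_left
                    intro p hp
                    have : (p.1 == i) = false := by
                      simp [hti p hp]
                    simp [this]
                  have hcnt : ∀ p ∈ t, pvTerm r p = pvTerm (i :: r) p := by
                    intro p hp
                    have h2 : ¬ i = p.1 := fun h => hti p hp h.symm
                    simp [pvTerm, h2]
                  have htmap2 : (t.map (pvTerm (i :: r))).sum = (t.map (pvTerm r)).sum := by
                    congr 1
                    apply List.map_congr_left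
                    intro p hp
                    exact (hcnt p hp).symm
                  rw [htmap, htmap2]
                  have hqi : ((i, v).1 == i) = true := by simp
                  simp only [hqi, if_true]
                  have hhead : pvTerm (i :: r) (i, v) = 1 + pvTerm r (i, d.getD i 0 - 1) := by
                    have hv0 : v > 0 := by omega
                    have hcnn : (0 : Int) ≤ (r.count i : Int) := by positivity
                    simp only [pvTerm, hgd, List.count_cons, beq_self_eq_true, if_true, min_def]
                    push_cast
                    split_ifs <;> omega
                  rw [hhead]; ring
                · -- (i,v) in tail, so q.1 ≠ i
                  have hqi : ¬ q.1 = i := by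
                    intro h
                    exact hnod.1 ⟨(i, v), ht, h.symm⟩
                  have hqb : (q.1 == i) = false := by simp [hqi]
                  have hq' : pvTerm (i :: r) q = pvTerm r q := by
                    have h2 : ¬ i = q.1 := fun h => hqi h.symm
                    simp [pvTerm, h2]
                  rw [iht hnod.2 ht, hq', hqb]
                  simp only [Bool.false_eq_true, if_false, Function.comp_def]
                  ring
          have hnoditems : (d.items.map Prod.fst).Nodup := hnd
          rw [key d.items hnoditems hmem]
          ring
        · simp only [hc, if_true]
          rw [if_neg hpos]
          rw [ih _ _ hnd]
          congr 2
          apply List.map_congr_left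
          intro p hp
          by_cases hpi : p.1 = i
          · have : d.get? p.1 = some p.2 := PySem.Dict.get?_of_mem_items _ hp hnd
            rw [hpi, hv] at this
            have hpv : p.2 = v := (Option.some.inj this).symm
            have : ¬ p.2 > 0 := by rw [hpv]; omega
            simp [pvTerm, this]
          · have h2 : ¬ i = p.1 := fun h => hpi h.symm
            simp [pvTerm, h2]
      · simp only [hc]
        rw [if_neg (by simp [hc]), ih _ _ hnd]
        congr 2
        apply List.map_congr_left
        intro p hp
        have hpi : ¬ p.1 = i := by
          intro h
          have : p.1 ∈ d.keys := PySem.Dict.mem_keys_of_mem_items _ hp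
          rw [← PySem.Dict.contains_iff_mem_keys, h] at this
          simp [hc] at this
        have h2 : ¬ i = p.1 := fun h => hpi h.symm
        simp [pvTerm, h2]

-- ===== VERDICT (by name: the statement is the Claim_ definition above) =====
theorem order_lunches_spec : Claim_equal_order_lunches := by
  intro stock orders _ hpre
  unfold Spec_order_lunches order_lunches order_lunches_alt
  have hnd : (PySem.Dict.mk stock).keys.Nodup := by
    simpa [PySem.Dict.keys] using hpre
  rw [pvA_fold orders (PySem.Dict.mk stock) 0 hnd]
  rw [pvB_fold orders stock (PySem.Dict.mk stock) 0]
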